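-- pv_equiv track=rewrite | github.com/Ojas-Arora/4th-Semester | Analysis and Design of Algorithms/N-ary Search Analysis.py | n_ary
-- ===== SOURCE A (Python) =====
-- def binarySearch(arr, L, r, x):
--     if r >= L:
--         mid = L + (r - L) // 2
--         if arr[mid] == x:
--             return mid
--         elif arr[mid] > x:
--             return binarySearch(arr, L, mid-1, x)
--         else:
--             return binarySearch(arr, mid + 1, r, x)
--     else:
--         return -1
--
-- def n_ary(arr, cuts, start_Loc, end_Loc, key):
--     N = end_Loc - start_Loc
--     cut_loc = []
--
--     if N < (cuts + 1):
--         k = binarySearch(arr, start_Loc, end_Loc, key)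
--         return k
--     else:
--         for i in range(1, cuts + 1):
--             cut_loc.append(((i * N) // (cuts + 1)) + start_Loc)
--
--         for j in range(0, cuts):
--             if key == arr[cut_loc[j]]:
--                 return cut_loc[j]
--             if key < arr[cut_loc[j]]:
--                 return n_ary(arr, cuts, start_Loc, cut_loc[j], key)
--             start_Loc = cut_loc[j]  # Moved this line here
--             if (j + 1) == cuts and key > arr[cut_loc[j]]:
--                 return n_ary(arr, cuts, cut_loc[j], end_Loc, key)
-- ===== SOURCE B (Python) =====
-- def n_ary(arr, cuts, start_Loc, end_Loc, key):
--     lo, hi = start_Loc, end_Loc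
--     while cuts >= 1 and hi - lo >= cuts + 1:
--         n = hi - lo
--         base = lo
--         for j in range(1, cuts + 1):
--             c = (j * n) // (cuts + 1) + base
--             v = arr[c]
--             if key == v:
--                 return c
--             if key < v:
--                 hi = c
--                 break
--             lo = c
--     L, r = lo, hi
--     while r >= L:
--         mid = L + (r - L) // 2
--         v = arr[mid]
--         if v == key:
--             return mid
--         if v > key:
--             r = mid - 1
--         else:
--             L = mid + 1
--     return -1
-- ===== Notes on version B (the rewrite author's own statement) =====
-- stated objective: alternative
-- what changed: Replaces the recursive n-ary narrowing (which rebuilds a cut-location list and recurses on itself, plus a recursive binarySearch helper) by a single iterative while-loop maintaining lo/hi bounds with the cut position computed directly per step, followed by an iterative binary search; no recursion and no intermediate list.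
-- outside the precondition, e.g. on n_ary([0, 1], -1, -1, -1, -1): A returns None, B returns -1; on n_ary([5, 9], 1, 0, 2, 5): A returns 0, B returns 0
import Mathlib
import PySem

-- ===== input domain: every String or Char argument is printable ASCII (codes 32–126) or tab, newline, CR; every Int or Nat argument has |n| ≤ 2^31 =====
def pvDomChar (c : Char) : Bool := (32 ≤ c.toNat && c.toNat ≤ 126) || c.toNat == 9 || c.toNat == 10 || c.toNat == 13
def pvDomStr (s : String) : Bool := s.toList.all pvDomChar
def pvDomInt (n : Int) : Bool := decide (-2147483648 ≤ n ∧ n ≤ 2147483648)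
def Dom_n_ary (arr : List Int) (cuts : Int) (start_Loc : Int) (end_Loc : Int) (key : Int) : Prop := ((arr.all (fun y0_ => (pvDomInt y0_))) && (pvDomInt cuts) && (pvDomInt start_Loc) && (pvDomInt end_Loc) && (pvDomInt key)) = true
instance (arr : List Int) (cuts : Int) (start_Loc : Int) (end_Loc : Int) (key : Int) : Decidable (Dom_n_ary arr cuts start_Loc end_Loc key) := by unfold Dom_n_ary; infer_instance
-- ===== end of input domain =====

-- B replaces A's recursive n-ary search (with its cut-location list and recursive binarySearch) by one
-- iterative bound-narrowing loop plus an iterative binary search; same results on Pre_, similar cost.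


-- ===== PORT A =====
-- A's recursive binarySearch; fuel makes the recursion total, (r-L).toNat+1 steps always suffice
def bsA (fuel : Nat) (arr : List Int) (L r x : Int) : Int :=
  match fuel with
  | 0 => -1  -- fuel exhausted (never reached at the fuel used below)
  | f + 1 =>
    if r ≥ L then
      let mid := L + PySem.Int.floordiv (r - L) 2
      match PySem.List.pyGet? arr mid with
      | none => -3  -- Python raises IndexError here; excluded by Pre_
      | some v =>
        if v = x then mid
        else if v > x then bsA f arr L (mid - 1) x
        else bsA f arr (mid + 1) r x
    else -1

mutual
-- A's n_ary body; fuel makes the self-recursion total ((e-s).toNat+1 always suffices)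
def nAryA (fuel : Nat) (arr : List Int) (cuts s e key : Int) : Int :=
  match fuel with
  | 0 => -1  -- fuel exhausted (never reached at the fuel used below)
  | f + 1 =>
    let N := e - s
    if N < cuts + 1 then bsA ((e - s).toNat + 1) arr s e key
    else
      let cutLoc := (PySem.List.pyRange 1 (cuts + 1) 1).map
        (fun i => PySem.Int.floordiv (i * N) (cuts + 1) + s)
      scanA f arr cuts s e key cutLoc (PySem.List.pyRange 0 cuts 1) s
  termination_by (fuel, 0)
-- A's inner 'for j in range(0, cuts)' with the in-loop mutation of start_Loc as accumulator 'start'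
def scanA (f : Nat) (arr : List Int) (cuts s e key : Int)
    (cutLoc : List Int) (js : List Int) (start : Int) : Int :=
  match js with
  | [] => -2  -- Python A falls off the loop and returns None here; excluded by Pre_
  | j :: rest =>
    let c := PySem.List.pyGetD cutLoc j 0
    match PySem.List.pyGet? arr c with
    | none => -3  -- Python raises IndexError here; excluded by Pre_
    | some v =>
      if key = v then c
      else if key < v then nAryA f arr cuts start c key
      else if j + 1 = cuts ∧ key > v then nAryA f arr cuts c e key
      else scanA f arr cuts s e key cutLoc rest c
  termination_by (f, js.length + 1)
end

def n_ary (arr : List Int) (cuts : Int) (start_Loc : Int) (end_Loc : Int) (key : Int) : Int :=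
  nAryA ((end_Loc - start_Loc).toNat + 1) arr cuts start_Loc end_Loc key

-- ===== PORT B =====
-- B's trailing iterative binary-search while-loop, as a fuel-bounded tail recursion
def bsB (fuel : Nat) (arr : List Int) (L r x : Int) : Int :=
  match fuel with
  | 0 => -1  -- fuel exhausted (never reached at the fuel used below)
  | f + 1 =>
    if r ≥ L then
      let mid := L + PySem.Int.floordiv (r - L) 2
      match PySem.List.pyGet? arr mid with
      | none => -3  -- Python raises IndexError here; excluded by Pre_
      | some v =>
        if v = x then mid
        else if v > x then bsB f arr L (mid - 1) x
        else bsB f arr (mid + 1) r x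
    else -1

-- result of one pass of B's inner for-loop: an answer, or the narrowed (lo, hi) window
inductive ScanR where
  | found : Int → ScanR
  | narrow : Int → Int → ScanR
deriving Repr, DecidableEq

-- B's inner 'for j in range(1, cuts+1)' over the current window (base, n = hi - lo)
def scanB (arr : List Int) (key n cuts base : Int) (js : List Int) (lo hi : Int) : ScanR :=
  match js with
  | [] => .narrow lo hi
  | j :: rest =>
    let c := PySem.Int.floordiv (j * n) (cuts + 1) + base
    match PySem.List.pyGet? arr c with
    | none => .found (-3)  -- Python raises IndexError here; excluded by Pre_
    | some v =>
      if key = v then .found c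
      else if key < v then .narrow lo c
      else scanB arr key n cuts base rest c hi

-- B's outer 'while cuts >= 1 and hi - lo >= cuts + 1' loop, as a fuel-bounded tail recursion
def whileB (fuel : Nat) (arr : List Int) (cuts key lo hi : Int) : Int :=
  match fuel with
  | 0 => -1  -- fuel exhausted (never reached at the fuel used below)
  | f + 1 =>
    if cuts ≥ 1 ∧ hi - lo ≥ cuts + 1 then
      match scanB arr key (hi - lo) cuts lo (PySem.List.pyRange 1 (cuts + 1) 1) lo hi with
      | .found c => c
      | .narrow lo' hi' => whileB f arr cuts key lo' hi'
    else bsB ((hi - lo).toNat + 1) arr lo hi key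

def n_ary_alt (arr : List Int) (cuts : Int) (start_Loc : Int) (end_Loc : Int) (key : Int) : Int :=
  whileB ((end_Loc - start_Loc).toNat + 1) arr cuts key start_Loc end_Loc

-- ===== PRECONDITION & SPEC =====
-- Pre_ excludes cuts ≤ 0 with a window of at least cuts+1 (A falls off its loop and returns None, no
-- int at all) and nonempty windows reaching outside [-len, len) (A's indexing raises IndexError —
-- except on some value-dependent lucky inputs where the search happens to stop before the bad access).
def Pre_n_ary (arr : List Int) (cuts : Int) (start_Loc : Int) (end_Loc : Int) (key : Int) : Prop :=
  (1 ≤ cuts ∨ end_Loc - start_Loc < cuts + 1) ∧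
    (end_Loc < start_Loc ∨ (-(arr.length : Int) ≤ start_Loc ∧ end_Loc < arr.length))
instance (arr : List Int) (cuts : Int) (start_Loc : Int) (end_Loc : Int) (key : Int) : Decidable (Pre_n_ary arr cuts start_Loc end_Loc key) := by unfold Pre_n_ary; infer_instance

def pvWitness_n_ary : List Int × Int × Int × Int × Int := ([1, 3, 5, 7, 9], 2, 0, 4, 7)

def Spec_n_ary (arr : List Int) (cuts : Int) (start_Loc : Int) (end_Loc : Int) (key : Int) (out : Int) : Prop := out = n_ary_alt arr cuts start_Loc end_Loc key
instance (arr : List Int) (cuts : Int) (start_Loc : Int) (end_Loc : Int) (key : Int) (out : Int) : Decidable (Spec_n_ary arr cuts start_Loc end_Loc key out) := by unfold Spec_n_ary; infer_instance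

-- ===== CLAIM (what is proved, stated in full; the proofs are below) =====
def Claim_equal_n_ary : Prop := ∀ (arr : List Int) (cuts : Int) (start_Loc : Int) (end_Loc : Int) (key : Int), Dom_n_ary arr cuts start_Loc end_Loc key → Pre_n_ary arr cuts start_Loc end_Loc key → Spec_n_ary arr cuts start_Loc end_Loc key (n_ary arr cuts start_Loc end_Loc key)

-- ===== LEMMAS AND PROOFS =====

theorem bs_eq (fuel : Nat) (arr : List Int) (L r x : Int) :
    bsA fuel arr L r x = bsB fuel arr L r x := by
  induction fuel generalizing L r with
  | zero => rfl
  | succ f ih =>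
    simp only [bsA, bsB]
    split_ifs with h
    · cases PySem.List.pyGet? arr (L + PySem.Int.floordiv (r - L) 2) with
      | none => rfl
      | some v =>
        simp only
        split_ifs <;> first | rfl | apply ih
    · rfl

theorem scan_eq (f : Nat) (arr : List Int) (cuts s e key : Int)
    (hc : 1 ≤ cuts)
    (hIH : ∀ lo hi : Int, (1 ≤ cuts ∨ hi - lo < cuts + 1) →
      nAryA f arr cuts lo hi key = whileB f arr cuts key lo hi)
    (m k : Nat) (hk : (k : Int) < cuts) (hm : cuts.toNat - k = m) (start : Int) :
    scanA f arr cuts s e key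
        ((PySem.List.pyRange 1 (cuts + 1) 1).map
          (fun i => PySem.Int.floordiv (i * (e - s)) (cuts + 1) + s))
        (PySem.List.pyRange (k : Int) cuts 1) start =
      (match scanB arr key (e - s) cuts s (PySem.List.pyRange ((k : Int) + 1) (cuts + 1) 1) start e with
        | .found c => c
        | .narrow lo' hi' => whileB f arr cuts key lo' hi') := by
  induction m generalizing k start with
  | zero => omega
  | succ m ihm =>
    rw [PySem.List.pyRange_one_cons hk, PySem.List.pyRange_one_cons (by omega : (k : Int) + 1 < cuts + 1)]
    have hidx : PySem.List.pyGetD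
        ((PySem.List.pyRange 1 (cuts + 1) 1).map
          (fun i => PySem.Int.floordiv (i * (e - s)) (cuts + 1) + s)) (k : Int) 0
        = PySem.Int.floordiv ((1 + (k : Int)) * (e - s)) (cuts + 1) + s := by
      exact PySem.List.pyGetD_map_pyRange_one _ 1 (cuts + 1) k 0 (by omega)
    simp only [scanA, scanB, hidx]
    have hcc : (1 + (k : Int)) * (e - s) = ((k : Int) + 1) * (e - s) := by ring
    rw [hcc]
    cases hget : PySem.List.pyGet? arr (PySem.Int.floordiv (((k : Int) + 1) * (e - s)) (cuts + 1) + s) with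
    | none => rfl
    | some v =>
      simp only
      by_cases h1 : key = v
      · simp [h1]
      · by_cases h2 : key < v
        · simp only [if_neg h1, if_pos h2]
          exact hIH start _ (Or.inl hc)
        · simp only [if_neg h1, if_neg h2]
          by_cases h3 : (k : Int) + 1 = cuts
          · have hcond : (k : Int) + 1 = cuts ∧ key > v := ⟨h3, by omega⟩
            rw [if_pos hcond, h3]
            have hnil : PySem.List.pyRange (cuts + 1) (cuts + 1) 1 = [] := by
              rw [PySem.List.pyRange_one]; simp
            rw [hnil]
            simp only [scanB]
            exact hIH _ e (Or.inl hc)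
          · have h4 : ¬ ((k : Int) + 1 = cuts ∧ key > v) := by tauto
            simp only [if_neg h4]
            have hk1 : ((k + 1 : Nat) : Int) < cuts := by push_cast; omega
            have := ihm (k + 1) hk1 (by omega) (PySem.Int.floordiv (((k : Int) + 1) * (e - s)) (cuts + 1) + s)
            push_cast at this ⊢
            exact this

theorem main_eq (fuel : Nat) (arr : List Int) (cuts key : Int) :
    ∀ s e : Int, (1 ≤ cuts ∨ e - s < cuts + 1) →
      nAryA fuel arr cuts s e key = whileB fuel arr cuts key s e := by
  induction fuel with
  | zero => intro s e _; simp [nAryA, whileB]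
  | succ f ih =>
    intro s e hinv
    simp only [nAryA, whileB]
    by_cases hN : e - s < cuts + 1
    · rw [if_pos hN, if_neg (by omega)]
      exact bs_eq _ _ _ _ _
    · have hc : 1 ≤ cuts := by
        rcases hinv with h | h
        · exact h
        · omega
      rw [if_neg hN, if_pos ⟨hc, by omega⟩]
      have h0 : ((0 : Nat) : Int) < cuts := by exact_mod_cast hc
      have := scan_eq f arr cuts s e key hc (fun lo hi h => ih lo hi h)
        cuts.toNat 0 h0 (by omega) s
      simpa using this

-- ===== VERDICT (by name: the statement is the Claim_ definition above) =====
theorem n_ary_spec : Claim_equal_n_ary := by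
  intro arr cuts s e key _ hpre
  unfold Spec_n_ary n_ary n_ary_alt
  exact main_eq _ arr cuts key s e hpre.1
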